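-- pv_equiv track=rewrite | github.com/santhosh77h/card-expenses | backend/app/detector.py | detect_bank
-- ===== SOURCE A (Python) =====
-- BANK_KEYWORDS: dict[str, list[str]] = {
--     # India
--     "hdfc": ["hdfc bank", "hdfc credit card", "hdfcbank"],
--     "icici": ["icici bank", "icici credit card"],
--     "sbi": ["sbi card", "state bank of india", "sbicard"],
--     "axis": ["axis bank", "axis credit card"],
--     "kotak": ["kotak mahindra", "kotak bank", "kotak credit card"],
--     "yes_bank": ["yes bank"],
--     "indusind": ["indusind bank", "indusind credit card"],
--     "rbl": ["rbl bank", "rbl credit card"],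
--     "federal": ["federal bank"],
--     "idfc_first": ["idfc first", "idfc bank"],
--     "au_bank": ["au small finance", "au bank"],
--     "bob": ["bank of baroda"],
--     "canara": ["canara bank"],
--     "pnb": ["punjab national bank", "pnb"],
--     # US
--     "chase": ["chase", "jpmorgan chase"],
--     "citi": ["citibank", "citi credit card", "citi card"],
--     "bofa": ["bank of america"],
--     "wells_fargo": ["wells fargo"],
--     "capital_one": ["capital one"],
--     "discover": ["discover", "discover card", "discover it"],
--     "us_bank": ["u.s. bank", "us bank", "usbank"],
--     "synchrony": ["synchrony bank", "synchrony financial"],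
--     "pnc_us": ["pnc bank", "pnc financial"],
--     "td_bank": ["td bank"],
--     "usaa": ["usaa"],
--     "barclays_us": ["barclays us", "barclaycard us"],
--     # UK
--     "barclays_uk": ["barclays", "barclaycard"],
--     "hsbc_uk": ["hsbc uk", "hsbc credit card"],
--     "natwest": ["natwest", "national westminster"],
--     "lloyds": ["lloyds bank", "lloyds credit card"],
--     "santander_uk": ["santander uk"],
--     "halifax": ["halifax"],
--     "nationwide": ["nationwide building society", "nationwide credit card"],
--     "virgin_money": ["virgin money"],
--     "tesco_bank": ["tesco bank", "tesco credit card"],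
--     "ms_bank": ["m&s bank", "marks and spencer bank"],
--     "john_lewis": ["john lewis financial", "john lewis partnership card"],
--     "metro_bank": ["metro bank"],
--     "monzo": ["monzo"],
--     "starling": ["starling bank"],
--     # Multi-country
--     "amex": ["american express", "amex", "membership rewards"],
--     "hsbc": ["hsbc"],
-- }
--
-- def detect_bank(text: str) -> str:
--     """Identify the issuing bank from statement text. Returns bank key or 'generic'."""
--     text_lower = text.lower()
--     # Check more specific bank keys first (e.g., "hsbc_uk" before "hsbc")
--     # Sort by keyword length descending so longer/more-specific matches win
--     for bank, keywords in sorted(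
--         BANK_KEYWORDS.items(),
--         key=lambda item: max(len(kw) for kw in item[1]),
--         reverse=True,
--     ):
--         for kw in keywords:
--             if kw in text_lower:
--                 return bank
--     return "generic"
-- ===== SOURCE B (Python) =====
-- # B: compact pipe-delimited keyword table compiled once at import; single
-- # insertion-order pass keeping the best-scoring matching bank (no per-call sort).
-- _BANK_SPECS = [
--     ('hdfc', 'hdfc bank|hdfc credit card|hdfcbank'),
--     ('icici', 'icici bank|icici credit card'),
--     ('sbi', 'sbi card|state bank of india|sbicard'),
--     ('axis', 'axis bank|axis credit card'),
--     ('kotak', 'kotak mahindra|kotak bank|kotak credit card'),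
--     ('yes_bank', 'yes bank'),
--     ('indusind', 'indusind bank|indusind credit card'),
--     ('rbl', 'rbl bank|rbl credit card'),
--     ('federal', 'federal bank'),
--     ('idfc_first', 'idfc first|idfc bank'),
--     ('au_bank', 'au small finance|au bank'),
--     ('bob', 'bank of baroda'),
--     ('canara', 'canara bank'),
--     ('pnb', 'punjab national bank|pnb'),
--     ('chase', 'chase|jpmorgan chase'),
--     ('citi', 'citibank|citi credit card|citi card'),
--     ('bofa', 'bank of america'),
--     ('wells_fargo', 'wells fargo'),
--     ('capital_one', 'capital one'),
--     ('discover', 'discover|discover card|discover it'),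
--     ('us_bank', 'u.s. bank|us bank|usbank'),
--     ('synchrony', 'synchrony bank|synchrony financial'),
--     ('pnc_us', 'pnc bank|pnc financial'),
--     ('td_bank', 'td bank'),
--     ('usaa', 'usaa'),
--     ('barclays_us', 'barclays us|barclaycard us'),
--     ('barclays_uk', 'barclays|barclaycard'),
--     ('hsbc_uk', 'hsbc uk|hsbc credit card'),
--     ('natwest', 'natwest|national westminster'),
--     ('lloyds', 'lloyds bank|lloyds credit card'),
--     ('santander_uk', 'santander uk'),
--     ('halifax', 'halifax'),
--     ('nationwide', 'nationwide building society|nationwide credit card'),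
--     ('virgin_money', 'virgin money'),
--     ('tesco_bank', 'tesco bank|tesco credit card'),
--     ('ms_bank', 'm&s bank|marks and spencer bank'),
--     ('john_lewis', 'john lewis financial|john lewis partnership card'),
--     ('metro_bank', 'metro bank'),
--     ('monzo', 'monzo'),
--     ('starling', 'starling bank'),
--     ('amex', 'american express|amex|membership rewards'),
--     ('hsbc', 'hsbc'),
-- ]
--
-- # Compiled once at import: split each pipe-delimited spec into its keyword list.
-- _TABLE = [(bank, spec.split("|")) for bank, spec in _BANK_SPECS]
--
--
-- def detect_bank(text: str) -> str:
--     """Identify the issuing bank from statement text. Returns bank key or 'generic'."""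
--     t = text.lower()
--     # Single pass in table order, no per-call sort: keep the matching bank with the
--     # largest max-keyword-length; strict '>' keeps the first such bank on ties, which
--     # reproduces the stable descending sort of the original.
--     best = None  # (bank, score)
--     for bank, kws in _TABLE:
--         if any(kw in t for kw in kws):
--             score = max(len(kw) for kw in kws)
--             if best is None or score > best[1]:
--                 best = (bank, score)
--     return best[0] if best is not None else "generic"
-- ===== Notes on version B (the rewrite author's own statement) =====
-- stated objective: alternative
-- what changed: Replaced the per-call stable descending sort plus first-match nested scan by a compact pipe-delimited keyword table compiled once at import and a single insertion-order fold that keeps the matching bank with the largest max-keyword-length (strict '>' preserves the first such bank on ties, matching the stable sort).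
import Mathlib
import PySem

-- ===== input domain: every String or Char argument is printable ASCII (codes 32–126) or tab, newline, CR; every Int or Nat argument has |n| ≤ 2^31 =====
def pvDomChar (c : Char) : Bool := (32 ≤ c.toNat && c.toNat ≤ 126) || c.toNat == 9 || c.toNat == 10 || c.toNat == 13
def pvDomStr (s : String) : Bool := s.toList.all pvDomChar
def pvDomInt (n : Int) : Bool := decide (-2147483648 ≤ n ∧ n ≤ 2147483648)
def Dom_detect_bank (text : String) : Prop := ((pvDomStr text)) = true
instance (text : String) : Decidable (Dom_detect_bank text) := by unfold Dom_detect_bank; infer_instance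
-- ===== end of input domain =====

-- B stores the keyword data as a compact pipe-delimited table compiled once at import and
-- replaces A's per-call stable descending sort + early-return scan by a single
-- insertion-order fold keeping the matching bank with the largest max-keyword-length
-- (strict '>' keeps the first such bank on ties).

-- ===== PORT A =====
-- A's module constant BANK_KEYWORDS (dict literal → association list in insertion order).
def bankKeywords : List (String × List String) :=
  [ ("hdfc", ["hdfc bank", "hdfc credit card", "hdfcbank"]),
    ("icici", ["icici bank", "icici credit card"]),
    ("sbi", ["sbi card", "state bank of india", "sbicard"]),
    ("axis", ["axis bank", "axis credit card"]),
    ("kotak", ["kotak mahindra", "kotak bank", "kotak credit card"]),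
    ("yes_bank", ["yes bank"]),
    ("indusind", ["indusind bank", "indusind credit card"]),
    ("rbl", ["rbl bank", "rbl credit card"]),
    ("federal", ["federal bank"]),
    ("idfc_first", ["idfc first", "idfc bank"]),
    ("au_bank", ["au small finance", "au bank"]),
    ("bob", ["bank of baroda"]),
    ("canara", ["canara bank"]),
    ("pnb", ["punjab national bank", "pnb"]),
    ("chase", ["chase", "jpmorgan chase"]),
    ("citi", ["citibank", "citi credit card", "citi card"]),
    ("bofa", ["bank of america"]),
    ("wells_fargo", ["wells fargo"]),
    ("capital_one", ["capital one"]),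
    ("discover", ["discover", "discover card", "discover it"]),
    ("us_bank", ["u.s. bank", "us bank", "usbank"]),
    ("synchrony", ["synchrony bank", "synchrony financial"]),
    ("pnc_us", ["pnc bank", "pnc financial"]),
    ("td_bank", ["td bank"]),
    ("usaa", ["usaa"]),
    ("barclays_us", ["barclays us", "barclaycard us"]),
    ("barclays_uk", ["barclays", "barclaycard"]),
    ("hsbc_uk", ["hsbc uk", "hsbc credit card"]),
    ("natwest", ["natwest", "national westminster"]),
    ("lloyds", ["lloyds bank", "lloyds credit card"]),
    ("santander_uk", ["santander uk"]),
    ("halifax", ["halifax"]),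
    ("nationwide", ["nationwide building society", "nationwide credit card"]),
    ("virgin_money", ["virgin money"]),
    ("tesco_bank", ["tesco bank", "tesco credit card"]),
    ("ms_bank", ["m&s bank", "marks and spencer bank"]),
    ("john_lewis", ["john lewis financial", "john lewis partnership card"]),
    ("metro_bank", ["metro bank"]),
    ("monzo", ["monzo"]),
    ("starling", ["starling bank"]),
    ("amex", ["american express", "amex", "membership rewards"]),
    ("hsbc", ["hsbc"]) ]

-- max(len(kw) for kw in kws): the identical Python expression in A (sort key) and B
-- (score). Keyword lists of the constant table are nonempty, so Python's max never
-- raises and the default 0 is never used.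
def maxKwLen (kws : List String) : Int :=
  PySem.List.maxD (kws.map PySem.Str.len) (fun x => x) 0

-- A's outer for-loop over the sorted items; the inner 'for kw in keywords: if kw in
-- text_lower: return bank' is the early-return any(...) over the keywords.
def detectLoopA (tl : String) : List (String × List String) → String
  | [] => "generic"
  | item :: rest =>
    if item.2.any (fun kw => PySem.Str.isIn kw tl) then item.1 else detectLoopA tl rest

def detect_bank (text : String) : String :=
  let text_lower := PySem.Str.lower text
  detectLoopA text_lower
    (PySem.List.sorted bankKeywords (fun item => maxKwLen item.2) true)

-- ===== PORT B =====
-- B's module constant _BANK_SPECS: (bank, pipe-delimited keywords), same insertion order.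
def bankSpecs : List (String × String) :=
  [ ("hdfc", "hdfc bank|hdfc credit card|hdfcbank"),
    ("icici", "icici bank|icici credit card"),
    ("sbi", "sbi card|state bank of india|sbicard"),
    ("axis", "axis bank|axis credit card"),
    ("kotak", "kotak mahindra|kotak bank|kotak credit card"),
    ("yes_bank", "yes bank"),
    ("indusind", "indusind bank|indusind credit card"),
    ("rbl", "rbl bank|rbl credit card"),
    ("federal", "federal bank"),
    ("idfc_first", "idfc first|idfc bank"),
    ("au_bank", "au small finance|au bank"),
    ("bob", "bank of baroda"),
    ("canara", "canara bank"),
    ("pnb", "punjab national bank|pnb"),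
    ("chase", "chase|jpmorgan chase"),
    ("citi", "citibank|citi credit card|citi card"),
    ("bofa", "bank of america"),
    ("wells_fargo", "wells fargo"),
    ("capital_one", "capital one"),
    ("discover", "discover|discover card|discover it"),
    ("us_bank", "u.s. bank|us bank|usbank"),
    ("synchrony", "synchrony bank|synchrony financial"),
    ("pnc_us", "pnc bank|pnc financial"),
    ("td_bank", "td bank"),
    ("usaa", "usaa"),
    ("barclays_us", "barclays us|barclaycard us"),
    ("barclays_uk", "barclays|barclaycard"),
    ("hsbc_uk", "hsbc uk|hsbc credit card"),
    ("natwest", "natwest|national westminster"),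
    ("lloyds", "lloyds bank|lloyds credit card"),
    ("santander_uk", "santander uk"),
    ("halifax", "halifax"),
    ("nationwide", "nationwide building society|nationwide credit card"),
    ("virgin_money", "virgin money"),
    ("tesco_bank", "tesco bank|tesco credit card"),
    ("ms_bank", "m&s bank|marks and spencer bank"),
    ("john_lewis", "john lewis financial|john lewis partnership card"),
    ("metro_bank", "metro bank"),
    ("monzo", "monzo"),
    ("starling", "starling bank"),
    ("amex", "american express|amex|membership rewards"),
    ("hsbc", "hsbc") ]

-- _TABLE = [(bank, spec.split("|")) for bank, spec in _BANK_SPECS], compiled at import.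
def bankTable : List (String × List String) :=
  -- spec.split("|"): the separator is the nonempty literal "|", so split? never returns
  -- none; .getD [] only makes the expression total.
  bankSpecs.map (fun p => (p.1, (PySem.Str.split? p.2 "|").getD []))

def detect_bank_alt (text : String) : String :=
  let t := PySem.Str.lower text
  let best :=
    bankTable.foldl
      (fun best item =>
        if item.2.any (fun kw => PySem.Str.isIn kw t) then
          let score := maxKwLen item.2
          match best with
          | none => some (item.1, score)
          | some b => if b.2 < score then some (item.1, score) else best
        else best)
      (none : Option (String × Int))
  match best with
  | some b => b.1
  | none => "generic"

-- ===== PRECONDITION & SPEC =====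
def Spec_detect_bank (text : String) (out : String) : Prop := out = detect_bank_alt text
instance (text : String) (out : String) : Decidable (Spec_detect_bank text out) := by unfold Spec_detect_bank; infer_instance

-- ===== CLAIM (what is proved, stated in full; the proofs are below) =====
def Claim_equal_detect_bank : Prop := ∀ (text : String), Dom_detect_bank text → Spec_detect_bank text (detect_bank text)

-- ===== LEMMAS AND PROOFS =====

-- B's compiled table is exactly A's dict: splitting each pipe-joined spec recovers the list.
theorem bankTable_eq : bankTable = bankKeywords := by decide

-- find? over a (descending-)sorted list after inserting x: x wins exactly when it matches
-- and every earlier match has a strictly smaller key.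
theorem find?_insertBy {α : Type} (k : α → Int) (x : α) (p : α → Bool) :
    ∀ (S : List α), S.Pairwise (fun a b => k b ≤ k a) →
    List.find? p (PySem.List.insertBy (fun a b => decide (k b < k a)) x S) =
      (match List.find? p S, p x with
        | some b, true => if k b < k x then some x else some b
        | some b, false => some b
        | none, true => some x
        | none, false => none) := by
  intro S
  induction S with
  | nil =>
    intro _
    cases hx : p x <;> simp [PySem.List.insertBy, List.find?, hx]
  | cons y S' ih =>
    intro hpw
    rw [List.pairwise_cons] at hpw
    obtain ⟨h1, h2⟩ := hpw
    by_cases hk : k y < k x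
    · -- x is inserted at the front
      have hins : PySem.List.insertBy (fun a b => decide (k b < k a)) x (y :: S') = x :: y :: S' := by
        simp [PySem.List.insertBy, hk]
      rw [hins]
      cases hx : p x
      · rw [List.find?_cons_of_neg (by simp only [hx]; decide)]
        cases hf : List.find? p (y :: S') <;> rfl
      · rw [List.find?_cons_of_pos hx]
        cases hf : List.find? p (y :: S') with
        | none => rfl
        | some b =>
          have hb : b ∈ y :: S' := List.mem_of_find?_eq_some hf
          have hble : k b ≤ k y := by
            rcases List.mem_cons.mp hb with h | h
            · exact le_of_eq (by rw [h])
            · exact h1 b h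
          have hblt : k b < k x := lt_of_le_of_lt hble hk
          show some x = if k b < k x then some x else some b
          rw [if_pos hblt]
    · -- x goes somewhere after y
      have hins : PySem.List.insertBy (fun a b => decide (k b < k a)) x (y :: S') =
          y :: PySem.List.insertBy (fun a b => decide (k b < k a)) x S' := by
        simp [PySem.List.insertBy, hk]
      rw [hins]
      cases hy : p y
      · rw [List.find?_cons_of_neg (by simp only [hy]; decide),
          show List.find? p (y :: S') = List.find? p S' from
            List.find?_cons_of_neg (by simp only [hy]; decide)]
        exact ih h2
      · rw [List.find?_cons_of_pos hy,
          show List.find? p (y :: S') = some y from List.find?_cons_of_pos hy]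
        cases hx : p x
        · rfl
        · show some y = if k y < k x then some x else some y
          rw [if_neg hk]

-- A's loop is find? followed by projecting the bank name.
theorem detectLoopA_eq_find? (tl : String) :
    ∀ (l : List (String × List String)),
      detectLoopA tl l =
        (match List.find? (fun item => item.2.any (fun kw => PySem.Str.isIn kw tl)) l with
          | some b => b.1
          | none => "generic") := by
  intro l
  induction l with
  | nil => rfl
  | cons item rest ih =>
    cases h : item.2.any (fun kw => PySem.Str.isIn kw tl) with
    | true =>
      have hfind := @List.find?_cons_of_pos _
        (fun it : String × List String => it.2.any (fun kw => PySem.Str.isIn kw tl)) item rest h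
      rw [detectLoopA, if_pos h, hfind]
    | false =>
      have hfind := @List.find?_cons_of_neg _
        (fun it : String × List String => it.2.any (fun kw => PySem.Str.isIn kw tl)) item rest
        (by simp only [h]; decide)
      rw [detectLoopA, if_neg (by simp only [h]; decide), hfind, ih]

-- B's fold computes (bank, score) of the first match of the descending-sorted list.
theorem fold_eq_find?_sorted (tl : String) :
    ∀ (L : List (String × List String)),
      L.foldl
        (fun best item =>
          if item.2.any (fun kw => PySem.Str.isIn kw tl) then
            let score := maxKwLen item.2
            match best with
            | none => some (item.1, score)
            | some b => if b.2 < score then some (item.1, score) else best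
          else best)
        (none : Option (String × Int)) =
      (List.find? (fun item => item.2.any (fun kw => PySem.Str.isIn kw tl))
          (PySem.List.sorted L (fun item => maxKwLen item.2) true)).map
        (fun it => (it.1, maxKwLen it.2)) := by
  intro L
  induction L using List.reverseRecOn with
  | nil => rfl
  | append_singleton L x ih =>
    rw [List.foldl_append, ih]
    have hsorted : PySem.List.sorted (L ++ [x]) (fun item => maxKwLen item.2) true =
        PySem.List.insertBy
          (fun a b => decide (maxKwLen b.2 < maxKwLen a.2)) x
          (PySem.List.sorted L (fun item => maxKwLen item.2) true) := by
      rw [PySem.List.sorted_rev_eq_foldl_insertBy, List.foldl_append,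
        ← PySem.List.sorted_rev_eq_foldl_insertBy]
      rfl
    rw [hsorted,
      find?_insertBy (fun item => maxKwLen item.2) x
        (fun item => item.2.any (fun kw => PySem.Str.isIn kw tl))
        _ (PySem.List.sorted_pairwise_rev L (fun item => maxKwLen item.2))]
    cases hf : List.find? (fun item => item.2.any (fun kw => PySem.Str.isIn kw tl))
        (PySem.List.sorted L (fun item => maxKwLen item.2) true) with
    | none =>
      cases hx : x.2.any (fun kw => PySem.Str.isIn kw tl) with
      | false =>
        simp only [Option.map_none, List.foldl_cons, List.foldl_nil]
        rw [if_neg (by simp only [hx]; decide)]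
      | true =>
        simp only [Option.map_none, List.foldl_cons, List.foldl_nil]
        rw [if_pos hx]
        rfl
    | some b =>
      cases hx : x.2.any (fun kw => PySem.Str.isIn kw tl) with
      | false =>
        simp only [Option.map_some, List.foldl_cons, List.foldl_nil]
        rw [if_neg (by simp only [hx]; decide)]
      | true =>
        simp only [Option.map_some, List.foldl_cons, List.foldl_nil]
        rw [if_pos hx]
        by_cases hlt : maxKwLen b.2 < maxKwLen x.2 <;> simp [hlt]

-- ===== VERDICT (by name: the statement is the Claim_ definition above) =====
theorem detect_bank_spec : Claim_equal_detect_bank := by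
  intro text _
  unfold Spec_detect_bank detect_bank detect_bank_alt
  simp only [bankTable_eq, fold_eq_find?_sorted, detectLoopA_eq_find?]
  cases hf : List.find?
      (fun item => item.2.any (fun kw => PySem.Str.isIn kw (PySem.Str.lower text)))
      (PySem.List.sorted bankKeywords (fun item => maxKwLen item.2) true) <;> rfl
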